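-- pv_equiv track=rewrite | github.com/eliottcassidy2000/math | 04-computation/tr_c2_spectral_invariant.py | count_3cycles
-- ===== SOURCE A (Python) =====
-- def count_3cycles(A):
--     n = len(A)
--     count = 0
--     for i in range(n):
--         for j in range(i+1, n):
--             for k in range(j+1, n):
--                 count += (A[i][j]*A[j][k]*A[k][i] + A[i][k]*A[k][j]*A[j][i])
--     return count
--
-- n = 7
--
-- count = 0
-- ===== SOURCE B (Python) =====
-- def count_3cycles(A):
--     # Group by the largest index k: every ordered pair (i, j) of distinct
--     # indices below k contributes A[k][i]*A[i][j]*A[j][k]; the inner sum over j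
--     # is a dot product of row i with column k, with the j == i term removed.
--     n = len(A)
--     total = 0
--     for k in range(n):
--         col = [A[j][k] for j in range(k)]
--         for i in range(k):
--             row = A[i]
--             s = sum(x * y for x, y in zip(row, col)) - row[i] * col[i]
--             total += A[k][i] * s
--     return total
-- ===== Notes on version B (the rewrite author's own statement) =====
-- stated objective: alternative
-- what changed: B replaces A's enumeration of unordered index triples i<j<k (six multiplications per triple) by grouping on the largest index k: it extracts column k once and sums, for each i below k, A[k][i] times a zip dot product of row i with that column (minus the j==i term), covering both cycle orientations as ordered pairs.
-- outside the precondition, e.g. on count_3cycles([[], []]): A returns 0, B raises IndexError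
import Mathlib
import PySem

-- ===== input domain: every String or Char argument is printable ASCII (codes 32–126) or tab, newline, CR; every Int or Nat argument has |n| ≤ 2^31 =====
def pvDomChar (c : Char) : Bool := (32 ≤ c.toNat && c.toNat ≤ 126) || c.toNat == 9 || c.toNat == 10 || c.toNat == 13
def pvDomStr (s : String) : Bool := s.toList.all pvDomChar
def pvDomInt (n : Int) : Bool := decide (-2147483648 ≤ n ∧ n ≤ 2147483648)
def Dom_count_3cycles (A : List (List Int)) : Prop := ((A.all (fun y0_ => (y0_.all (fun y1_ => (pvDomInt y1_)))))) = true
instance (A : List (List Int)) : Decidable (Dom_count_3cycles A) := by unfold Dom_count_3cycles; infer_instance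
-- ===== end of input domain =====

-- B regroups the triple-loop sum by the largest index k as a dot product per (k, i),
-- one pass over ordered pairs instead of unordered triples (objective: alternative decomposition).

-- ===== PORT A =====
-- A[i][j] (both indices are in range on every admitted input; shared by both ports)
def pvIdx (A : List (List Int)) (i j : Int) : Int :=
  PySem.List.pyGetD (PySem.List.pyGetD A i []) j 0

def count_3cycles (A : List (List Int)) : Int :=
  let n : Int := A.length
  (PySem.List.pyRange 0 n 1).foldl (fun count i =>
    (PySem.List.pyRange (i+1) n 1).foldl (fun count j =>
      (PySem.List.pyRange (j+1) n 1).foldl (fun count k =>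
        count + (pvIdx A i j * pvIdx A j k * pvIdx A k i
                 + pvIdx A i k * pvIdx A k j * pvIdx A j i)) count) count) 0

-- ===== PORT B =====
def count_3cycles_alt (A : List (List Int)) : Int :=
  let n : Int := A.length
  (PySem.List.pyRange 0 n 1).foldl (fun total k =>
    let col := (PySem.List.pyRange 0 k 1).map (fun j => pvIdx A j k)
    (PySem.List.pyRange 0 k 1).foldl (fun total i =>
      let row := PySem.List.pyGetD A i []
      let s := ((row.zip col).map (fun p => p.1 * p.2)).sum
               - PySem.List.pyGetD row i 0 * PySem.List.pyGetD col i 0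
      total + pvIdx A k i * s) total) 0

-- ===== PRECONDITION & SPEC =====
-- Pre_ excludes jagged matrices (some row shorter than len(A)): there A either raises
-- IndexError or, when the short entries happen never to be reached (n < 3, or only the
-- last row short), returns by accident of its loop bounds while B may raise.
def Pre_count_3cycles (A : List (List Int)) : Prop := ∀ row ∈ A, A.length ≤ row.length
instance (A : List (List Int)) : Decidable (Pre_count_3cycles A) := by
  unfold Pre_count_3cycles; infer_instance

def pvWitness_count_3cycles : List (List Int) := [[0, 1, 2], [3, 4, 5], [6, 7, 8]]

def Spec_count_3cycles (A : List (List Int)) (out : Int) : Prop := out = count_3cycles_alt A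
instance (A : List (List Int)) (out : Int) : Decidable (Spec_count_3cycles A out) := by
  unfold Spec_count_3cycles; infer_instance

-- ===== CLAIM (what is proved, stated in full; the proofs are below) =====
def Claim_equal_count_3cycles : Prop := ∀ (A : List (List Int)), Dom_count_3cycles A → Pre_count_3cycles A → Spec_count_3cycles A (count_3cycles A)

-- ===== LEMMAS AND PROOFS =====

-- the matrix entry at Nat indices, with A's total-default reading
def pvG (A : List (List Int)) (i j : Nat) : Int := (A.getD i []).getD j 0

-- the weighted pair of 3-cycles on the unordered triple {i, j, k}
def pvT (g : Nat → Nat → Int) (i j k : Nat) : Int :=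
  g i j * g j k * g k i + g i k * g k j * g j i

-- sum of f over range(a, b) as a Finset sum (0 ≤ a)
theorem pvSumIco (a b : Int) (f : Int → Int) (ha : 0 ≤ a) :
    ((PySem.List.pyRange a b 1).map f).sum = ∑ x ∈ Finset.Ico a.toNat b.toNat, f ↑x := by
  rw [PySem.List.pyRange_one, List.map_map, Finset.sum_Ico_eq_sum_range]
  have h1 : ((List.range (b - a).toNat).map (f ∘ fun k => a + ↑k)).sum
      = ∑ x ∈ Finset.range (b - a).toNat, f (a + ↑x) := rfl
  rw [h1]
  have h2 : b.toNat - a.toNat = (b - a).toNat := by omega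
  rw [h2]
  refine Finset.sum_congr rfl fun k _ => ?_
  congr 1
  omega

-- sum(x*y for x, y in zip(u, v)) when v is the shorter list
theorem pvZipSum (u v : List Int) (h : v.length ≤ u.length) :
    ((u.zip v).map (fun p => p.1 * p.2)).sum
      = ∑ j ∈ Finset.range v.length, u.getD j 0 * v.getD j 0 := by
  induction v generalizing u with
  | nil => simp
  | cons b vt ih =>
    cases u with
    | nil => simp at h
    | cons a ut =>
      simp only [List.zip_cons_cons, List.map_cons, List.sum_cons, List.length_cons]
      rw [Finset.sum_range_succ']
      simp only [List.getD_cons_succ, List.getD_cons_zero]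
      rw [ih ut (by simpa using h)]
      ring

theorem pvIcoGuard (m n : Nat) (F : Nat → Int) :
    ∑ j ∈ Finset.Ico m n, F j = ∑ j ∈ Finset.range n, if m ≤ j then F j else 0 := by
  rw [← Finset.sum_filter]
  congr 1
  ext j
  simp [Finset.mem_Ico, Finset.mem_range, Finset.mem_filter]
  omega

theorem pvRangeGuard (k n : Nat) (h : k ≤ n) (F : Nat → Int) :
    ∑ j ∈ Finset.range k, F j = ∑ j ∈ Finset.range n, if j < k then F j else 0 := by
  rw [← Finset.sum_filter]
  congr 1
  ext j
  simp [Finset.mem_range, Finset.mem_filter]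
  omega

-- the core reindexing: triples i<j<k, both orientations  =  ordered pairs i≠j below a pivot k
theorem pvCore (g : Nat → Nat → Int) (n : Nat) :
    (∑ i ∈ Finset.range n, ∑ j ∈ Finset.Ico (i+1) n, ∑ k ∈ Finset.Ico (j+1) n, pvT g i j k)
      = ∑ k ∈ Finset.range n, ∑ i ∈ Finset.range k,
          g k i * ((∑ j ∈ Finset.range k, g i j * g j k) - g i i * g i k) := by
  have hRHS : (∑ k ∈ Finset.range n, ∑ i ∈ Finset.range k,
          g k i * ((∑ j ∈ Finset.range k, g i j * g j k) - g i i * g i k))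
      = ∑ k ∈ Finset.range n, ∑ i ∈ Finset.range n, ∑ j ∈ Finset.range n,
          (if i < k ∧ j < k ∧ j ≠ i then g k i * g i j * g j k else 0) := by
    refine Finset.sum_congr rfl fun k hk => ?_
    have hkn : k ≤ n := le_of_lt (Finset.mem_range.mp hk)
    have hstep : ∀ i, i < k →
        g k i * ((∑ j ∈ Finset.range k, g i j * g j k) - g i i * g i k)
          = ∑ j ∈ Finset.range n, (if i < k ∧ j < k ∧ j ≠ i then g k i * g i j * g j k else 0) := by
      intro i hi
      rw [mul_sub, Finset.mul_sum]
      have h1 : g k i * (g i i * g i k)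
          = ∑ j ∈ Finset.range k, (if j = i then g k i * (g i j * g j k) else 0) := by
        rw [Finset.sum_ite_eq' (Finset.range k) i (fun j => g k i * (g i j * g j k))]
        simp [Finset.mem_range.mpr hi]
      rw [h1, ← Finset.sum_sub_distrib,
          pvRangeGuard k n hkn (fun j => g k i * (g i j * g j k)
            - if j = i then g k i * (g i j * g j k) else 0)]
      refine Finset.sum_congr rfl fun j _ => ?_
      split_ifs <;> first | omega | ring
    calc ∑ i ∈ Finset.range k,
            g k i * ((∑ j ∈ Finset.range k, g i j * g j k) - g i i * g i k)
        = ∑ i ∈ Finset.range k, ∑ j ∈ Finset.range n,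
            (if i < k ∧ j < k ∧ j ≠ i then g k i * g i j * g j k else 0) := by
          refine Finset.sum_congr rfl fun i hi => hstep i (Finset.mem_range.mp hi)
      _ = ∑ i ∈ Finset.range n, (if i < k then ∑ j ∈ Finset.range n,
            (if i < k ∧ j < k ∧ j ≠ i then g k i * g i j * g j k else 0) else 0) := by
          exact pvRangeGuard k n hkn _
      _ = ∑ i ∈ Finset.range n, ∑ j ∈ Finset.range n,
            (if i < k ∧ j < k ∧ j ≠ i then g k i * g i j * g j k else 0) := by
          refine Finset.sum_congr rfl fun i _ => ?_
          by_cases h : i < k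
          · simp [h]
          · simp [h]
  rw [hRHS]
  calc (∑ i ∈ Finset.range n, ∑ j ∈ Finset.Ico (i+1) n, ∑ k ∈ Finset.Ico (j+1) n, pvT g i j k)
      = ∑ i ∈ Finset.range n, ∑ j ∈ Finset.range n, ∑ k ∈ Finset.range n,
          (if i < j ∧ j < k then pvT g i j k else 0) := by
        refine Finset.sum_congr rfl fun i _ => ?_
        rw [pvIcoGuard (i+1) n]
        refine Finset.sum_congr rfl fun j _ => ?_
        by_cases hij : i + 1 ≤ j
        · simp only [if_pos hij]
          rw [pvIcoGuard (j+1) n]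
          refine Finset.sum_congr rfl fun kk _ => ?_
          split_ifs <;> omega
        · simp only [if_neg hij]
          symm
          refine Finset.sum_eq_zero fun kk _ => ?_
          split_ifs <;> omega
    _ = ∑ k ∈ Finset.range n, ∑ i ∈ Finset.range n, ∑ j ∈ Finset.range n,
          (if i < j ∧ j < k then pvT g i j k else 0) := by
        have s1 : (∑ i ∈ Finset.range n, ∑ j ∈ Finset.range n, ∑ k ∈ Finset.range n,
              (if i < j ∧ j < k then pvT g i j k else 0))
            = ∑ i ∈ Finset.range n, ∑ k ∈ Finset.range n, ∑ j ∈ Finset.range n,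
              (if i < j ∧ j < k then pvT g i j k else 0) :=
          Finset.sum_congr rfl fun i _ => Finset.sum_comm
        rw [s1]
        exact Finset.sum_comm
    _ = ∑ k ∈ Finset.range n, ∑ i ∈ Finset.range n, ∑ j ∈ Finset.range n,
          (if i < k ∧ j < k ∧ j ≠ i then g k i * g i j * g j k else 0) := by
        refine Finset.sum_congr rfl fun k _ => ?_
        have hsplit : (∑ i ∈ Finset.range n, ∑ j ∈ Finset.range n,
              (if i < j ∧ j < k then pvT g i j k else 0))
            = (∑ i ∈ Finset.range n, ∑ j ∈ Finset.range n,
                (if i < j ∧ j < k then g k i * g i j * g j k else 0))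
              + ∑ i ∈ Finset.range n, ∑ j ∈ Finset.range n,
                (if i < j ∧ j < k then g k j * g j i * g i k else 0) := by
          rw [← Finset.sum_add_distrib]
          refine Finset.sum_congr rfl fun i _ => ?_
          rw [← Finset.sum_add_distrib]
          refine Finset.sum_congr rfl fun j _ => ?_
          split_ifs with h
          · unfold pvT; ring
          · ring
        have hswap : (∑ i ∈ Finset.range n, ∑ j ∈ Finset.range n,
              (if i < j ∧ j < k then g k j * g j i * g i k else 0))
            = ∑ i ∈ Finset.range n, ∑ j ∈ Finset.range n,
              (if j < i ∧ i < k then g k i * g i j * g j k else 0) :=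
          Finset.sum_comm
        rw [hsplit, hswap, ← Finset.sum_add_distrib]
        refine Finset.sum_congr rfl fun i _ => ?_
        rw [← Finset.sum_add_distrib]
        refine Finset.sum_congr rfl fun j _ => ?_
        split_ifs <;> omega

theorem pvPortA_eq (A : List (List Int)) :
    count_3cycles A
      = ∑ i ∈ Finset.range A.length, ∑ j ∈ Finset.Ico (i+1) A.length,
          ∑ k ∈ Finset.Ico (j+1) A.length, pvT (pvG A) i j k := by
  unfold count_3cycles
  simp only [PySem.List.foldl_add, zero_add]
  rw [pvSumIco 0 (↑A.length) _ le_rfl]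
  rw [Int.toNat_zero, Int.toNat_natCast, ← Finset.range_eq_Ico]
  refine Finset.sum_congr rfl fun i _ => ?_
  rw [pvSumIco (↑i+1) (↑A.length) _ (by positivity)]
  have hi1 : ((i : Int) + 1).toNat = i + 1 := by omega
  rw [hi1, Int.toNat_natCast]
  refine Finset.sum_congr rfl fun j _ => ?_
  rw [pvSumIco (↑j+1) (↑A.length) _ (by positivity)]
  have hj1 : ((j : Int) + 1).toNat = j + 1 := by omega
  rw [hj1, Int.toNat_natCast]
  refine Finset.sum_congr rfl fun k _ => ?_
  simp [pvIdx, pvG, pvT, PySem.List.pyGetD_natCast]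

theorem pvPortB_eq (A : List (List Int)) (hp : Pre_count_3cycles A) :
    count_3cycles_alt A
      = ∑ k ∈ Finset.range A.length, ∑ i ∈ Finset.range k,
          pvG A k i * ((∑ j ∈ Finset.range k, pvG A i j * pvG A j k)
                        - pvG A i i * pvG A i k) := by
  unfold count_3cycles_alt
  simp only [PySem.List.foldl_add, zero_add]
  rw [pvSumIco 0 (↑A.length) _ le_rfl]
  rw [Int.toNat_zero, Int.toNat_natCast, ← Finset.range_eq_Ico]
  refine Finset.sum_congr rfl fun k hk => ?_
  have hkn : k < A.length := Finset.mem_range.mp hk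
  have hcol : (PySem.List.pyRange 0 (↑k) 1).map (fun j => pvIdx A j ↑k)
      = (List.range k).map (fun j => pvG A j k) := by
    rw [PySem.List.pyRange_one, List.map_map]
    simp [pvIdx, pvG, PySem.List.pyGetD_natCast, Function.comp]
  rw [hcol]
  rw [pvSumIco 0 (↑k) _ le_rfl]
  rw [Int.toNat_zero, Int.toNat_natCast, ← Finset.range_eq_Ico]
  refine Finset.sum_congr rfl fun i hi => ?_
  have hik : i < k := Finset.mem_range.mp hi
  have hrow : PySem.List.pyGetD A (↑i) ([] : List Int) = A.getD i [] :=
    PySem.List.pyGetD_natCast A i []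
  have hmem : A.getD i [] ∈ A := by
    rw [List.getD_eq_getElem A [] (by omega)]
    exact List.getElem_mem _
  have hlen : k ≤ (A.getD i []).length := le_trans (le_of_lt hkn) (hp _ hmem)
  have hzl : ((List.range k).map (fun j => pvG A j k)).length = k := by simp
  rw [hrow, pvZipSum (A.getD i []) ((List.range k).map (fun j => pvG A j k)) (by simpa using hlen)]
  rw [hzl]
  have hgetcol : ∀ m, m < k → ((List.range k).map (fun j => pvG A j k)).getD m 0 = pvG A m k := by
    intro m hm
    rw [List.getD_eq_getElem _ _ (by simpa using hm)]
    simp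
  have hsum : (∑ j ∈ Finset.range k, (A.getD i []).getD j 0
        * ((List.range k).map (fun j => pvG A j k)).getD j 0)
      = ∑ j ∈ Finset.range k, pvG A i j * pvG A j k := by
    refine Finset.sum_congr rfl fun j hj => ?_
    rw [hgetcol j (Finset.mem_range.mp hj)]
    rfl
  rw [hsum]
  rw [PySem.List.pyGetD_natCast ((List.range k).map (fun j => pvG A j k)) i 0]
  rw [PySem.List.pyGetD_natCast (A.getD i []) i 0]
  rw [hgetcol i hik]
  have h1 : pvIdx A (↑k) (↑i) = pvG A k i := by
    simp [pvIdx, pvG, PySem.List.pyGetD_natCast]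
  rw [h1]
  rfl

-- ===== VERDICT (by name: the statement is the Claim_ definition above) =====
theorem count_3cycles_spec : Claim_equal_count_3cycles := by
  intro A _ hp
  unfold Spec_count_3cycles
  rw [pvPortA_eq A, pvPortB_eq A hp, pvCore]
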